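-- pv_equiv track=rewrite | github.com/AlekseyDerevyannyh/01_GB_05_Python | seminar/04/HW/05_PolynomSum/polynomSum.py | CoefListToStrPolynom
-- ===== SOURCE A (Python) =====
-- def CoefListToStrPolynom (coefList):
-- 	polynom = ''
-- 	for i in range(len(coefList) - 1):
-- 		if coefList[i] == 0:
-- 			if coefList[i + 1] != 0:
-- 				polynom = polynom + ' + '
-- 		elif coefList[i] == 1:
-- 			if coefList[i + 1] != 0:
-- 				if len(coefList) - i - 1 == 1:
-- 					polynom = polynom + f'x + '
-- 				else:
-- 					polynom = polynom + f'x^{len(coefList) - i - 1} + '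
-- 			else:
-- 				if len(coefList) - i - 1 == 1:
-- 					polynom = polynom + f'x'
-- 				else:
-- 					polynom = polynom + f'x^{len(coefList) - i - 1}'
-- 		else:
-- 			if coefList[i + 1] != 0:
-- 				if len(coefList) - i - 1 == 1:
-- 					polynom = polynom + f'{coefList[i]}*x + '
-- 				else:
-- 					polynom = polynom + f'{coefList[i]}*x^{len(coefList) - i - 1} + '
-- 			else:
-- 				if len(coefList) - i - 1 == 1:
-- 					polynom = polynom + f'{coefList[i]}*x'
-- 				else:
-- 					polynom = polynom + f'{coefList[i]}*x^{len(coefList) - i - 1}'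
--
-- 	if coefList[-1] != 0:
-- 		polynom = polynom + f'{coefList[-1]} = 0'
-- 	else:
-- 		polynom = polynom + ' = 0'
-- 	return polynom
-- ===== SOURCE B (Python) =====
-- def _term(c, e):
--     if e == 0:
--         return f'{c}'
--     if c == 1:
--         return 'x' if e == 1 else f'x^{e}'
--     return f'{c}*x' if e == 1 else f'{c}*x^{e}'
--
-- def CoefListToStrPolynom(coefList):
--     n = len(coefList)
--     pieces = []
--     for j, c in enumerate(coefList):
--         if c != 0:
--             pieces.append((' + ' if j >= 1 else '') + _term(c, n - 1 - j))
--     return ''.join(pieces) + ' = 0'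
-- ===== Notes on version B (the rewrite author's own statement) =====
-- stated objective: simpler
-- what changed: B replaces A's lookahead separator logic (emitting the ' + ' while at position i by peeking at the next coefficient, duplicated across six formatting branches) with a single position-based rule: one pass collects, for each nonzero coefficient, a monomial built by one small term helper and prefixed with ' + ' exactly at the positions after the first, then joins the pieces.
import Mathlib
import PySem

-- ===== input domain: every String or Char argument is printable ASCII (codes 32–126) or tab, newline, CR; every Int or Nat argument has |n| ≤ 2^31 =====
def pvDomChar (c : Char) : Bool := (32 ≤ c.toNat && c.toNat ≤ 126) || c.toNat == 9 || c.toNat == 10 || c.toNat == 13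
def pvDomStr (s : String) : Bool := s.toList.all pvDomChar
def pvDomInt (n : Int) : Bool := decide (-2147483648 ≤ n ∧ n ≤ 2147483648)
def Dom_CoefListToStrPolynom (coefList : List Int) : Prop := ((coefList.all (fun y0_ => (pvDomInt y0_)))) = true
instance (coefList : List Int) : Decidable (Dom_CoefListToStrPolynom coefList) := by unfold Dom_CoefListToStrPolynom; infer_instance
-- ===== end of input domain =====

-- B replaces A's lookahead-at-coefList[i+1] separator logic with a position-based rule
-- (' + ' before every nonzero coefficient with index ≥ 1) and a single term builder; objective: simpler.

-- ===== PORT A =====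
def CoefListToStrPolynom (coefList : List Int) : String :=
  let n : Int := (coefList.length : Int)
  let polynom :=
    (PySem.List.pyRange 0 (n - 1) 1).foldl
      (fun polynom i =>
        let ci := PySem.List.pyGetD coefList i 0
        let cn := PySem.List.pyGetD coefList (i + 1) 0
        if ci = 0 then
          if cn ≠ 0 then polynom ++ " + " else polynom
        else if ci = 1 then
          if cn ≠ 0 then
            if n - i - 1 = 1 then polynom ++ "x + "
            else polynom ++ "x^" ++ PySem.Int.toStr (n - i - 1) ++ " + "
          else
            if n - i - 1 = 1 then polynom ++ "x"
            else polynom ++ "x^" ++ PySem.Int.toStr (n - i - 1)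
        else
          if cn ≠ 0 then
            if n - i - 1 = 1 then polynom ++ PySem.Int.toStr ci ++ "*x + "
            else polynom ++ PySem.Int.toStr ci ++ "*x^" ++ PySem.Int.toStr (n - i - 1) ++ " + "
          else
            if n - i - 1 = 1 then polynom ++ PySem.Int.toStr ci ++ "*x"
            else polynom ++ PySem.Int.toStr ci ++ "*x^" ++ PySem.Int.toStr (n - i - 1)) ""
  let clast := PySem.List.pyGetD coefList (-1) 0
  if clast ≠ 0 then polynom ++ (PySem.Int.toStr clast ++ " = 0")
  else polynom ++ " = 0"

-- ===== PORT B =====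
def pvTerm (c e : Int) : String :=
  if e = 0 then PySem.Int.toStr c
  else if c = 1 then (if e = 1 then "x" else "x^" ++ PySem.Int.toStr e)
  else (if e = 1 then PySem.Int.toStr c ++ "*x" else PySem.Int.toStr c ++ "*x^" ++ PySem.Int.toStr e)

def CoefListToStrPolynom_alt (coefList : List Int) : String :=
  let n : Int := (coefList.length : Int)
  let pieces :=
    (PySem.List.enumerate coefList 0).foldl
      (fun pieces jc =>
        if jc.2 ≠ 0 then
          pieces ++ [(if 1 ≤ jc.1 then " + " else "") ++ pvTerm jc.2 (n - 1 - jc.1)]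
        else pieces)
      ([] : List String)
  String.join pieces ++ " = 0"

-- ===== PRECONDITION & SPEC =====
-- Pre_ excludes only the empty list, on which A's final-element read raises IndexError.
def Pre_CoefListToStrPolynom (coefList : List Int) : Prop := coefList ≠ []
instance (coefList : List Int) : Decidable (Pre_CoefListToStrPolynom coefList) := by
  unfold Pre_CoefListToStrPolynom; infer_instance
def pvWitness_CoefListToStrPolynom : List Int := [1, 2]

def Spec_CoefListToStrPolynom (coefList : List Int) (out : String) : Prop :=
  out = CoefListToStrPolynom_alt coefList
instance (coefList : List Int) (out : String) : Decidable (Spec_CoefListToStrPolynom coefList out) := by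
  unfold Spec_CoefListToStrPolynom; infer_instance

-- ===== CLAIM (what is proved, stated in full; the proofs are below) =====
def Claim_equal_CoefListToStrPolynom : Prop := ∀ (coefList : List Int), Dom_CoefListToStrPolynom coefList → Pre_CoefListToStrPolynom coefList → Spec_CoefListToStrPolynom coefList (CoefListToStrPolynom coefList)

-- ===== LEMMAS AND PROOFS =====

-- Common reference: the polynomial pieces read structurally off the list; `first` says
-- whether we are at index 0 (no " + " prefix). The exponent of the head is the tail length.
def refGo : Bool → List Int → String
  | _, [] => ""
  | first, c :: t =>
      (if c = 0 then "" else (if first then "" else " + ") ++ pvTerm c (t.length : Int)) ++ refGo false t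

-- A's loop piece at a position with coefficient c, next coefficient c', exponent e ≥ 1.
def pvPieceA (c c' e : Int) : String :=
  (if c = 0 then "" else pvTerm c e) ++ (if c' ≠ 0 then " + " else "")

-- A's loop output read structurally, two elements at a time.
def pvGA : List Int → String
  | c :: c' :: t => pvPieceA c c' ((c' :: t).length : Int) ++ pvGA (c' :: t)
  | _ => ""

-- the string A's loop body appends at index i (the branch contents of the fold body)
def pvFA (coefList : List Int) (n i : Int) : String :=
  let ci := PySem.List.pyGetD coefList i 0
  let cn := PySem.List.pyGetD coefList (i + 1) 0
  if ci = 0 then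
    if cn ≠ 0 then " + " else ""
  else if ci = 1 then
    if cn ≠ 0 then
      if n - i - 1 = 1 then "x + "
      else "x^" ++ PySem.Int.toStr (n - i - 1) ++ " + "
    else
      if n - i - 1 = 1 then "x"
      else "x^" ++ PySem.Int.toStr (n - i - 1)
  else
    if cn ≠ 0 then
      if n - i - 1 = 1 then PySem.Int.toStr ci ++ "*x + "
      else PySem.Int.toStr ci ++ "*x^" ++ PySem.Int.toStr (n - i - 1) ++ " + "
    else
      if n - i - 1 = 1 then PySem.Int.toStr ci ++ "*x"
      else PySem.Int.toStr ci ++ "*x^" ++ PySem.Int.toStr (n - i - 1)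

lemma join_append_singleton (l : List String) (p : String) :
    String.join (l ++ [p]) = String.join l ++ p := by
  simp [String.join, List.foldl_append]

lemma strJoin_foldl (l : List String) (a : String) :
    l.foldl (fun r s => r ++ s) a = a ++ l.foldl (fun r s => r ++ s) "" := by
  induction l generalizing a with
  | nil => simp
  | cons x xs ih =>
      rw [List.foldl_cons, ih, List.foldl_cons, String.empty_append, ih x, String.append_assoc]

lemma join_cons_general (p : String) (l : List String) :
    String.join (p :: l) = p ++ String.join l := by
  simp only [String.join]
  rw [List.foldl_cons, String.empty_append, strJoin_foldl]

lemma foldl_strAppend (g : Int → String) (l : List Int) (acc : String) :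
    l.foldl (fun a i => a ++ g i) acc = acc ++ String.join (l.map g) := by
  induction l generalizing acc with
  | nil => simp [String.join]
  | cons x xs ih =>
      rw [List.map_cons, List.foldl_cons, ih, join_cons_general, String.append_assoc]

lemma refGo_false (c : Int) (t : List Int) :
    refGo false (c :: t) = (if c ≠ 0 then " + " else "") ++ refGo true (c :: t) := by
  by_cases hc : c = 0
  · simp [refGo, hc]
  · simp [refGo, hc, String.append_assoc]

lemma A_fold_body (coefList : List Int) (n : Int) (acc : String) (i : Int) :
    (let ci := PySem.List.pyGetD coefList i 0
     let cn := PySem.List.pyGetD coefList (i + 1) 0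
     if ci = 0 then
       if cn ≠ 0 then acc ++ " + " else acc
     else if ci = 1 then
       if cn ≠ 0 then
         if n - i - 1 = 1 then acc ++ "x + "
         else acc ++ "x^" ++ PySem.Int.toStr (n - i - 1) ++ " + "
       else
         if n - i - 1 = 1 then acc ++ "x"
         else acc ++ "x^" ++ PySem.Int.toStr (n - i - 1)
     else
       if cn ≠ 0 then
         if n - i - 1 = 1 then acc ++ PySem.Int.toStr ci ++ "*x + "
         else acc ++ PySem.Int.toStr ci ++ "*x^" ++ PySem.Int.toStr (n - i - 1) ++ " + "
       else
         if n - i - 1 = 1 then acc ++ PySem.Int.toStr ci ++ "*x"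
         else acc ++ PySem.Int.toStr ci ++ "*x^" ++ PySem.Int.toStr (n - i - 1))
    = acc ++ pvFA coefList n i := by
  unfold pvFA
  split_ifs <;> simp [String.append_assoc] <;> split_ifs <;> simp

lemma pvFA_shift (c : Int) (rest : List Int) (n : Int) (k : Nat) :
    pvFA (c :: rest) (n + 1) ((k : Int) + 1) = pvFA rest n (k : Int) := by
  unfold pvFA
  have h1 : PySem.List.pyGetD (c :: rest) ((k : Int) + 1) 0 = PySem.List.pyGetD rest (k : Int) 0 := by
    have e : ((k : Int) + 1) = ((k + 1 : Nat) : Int) := by push_cast; ring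
    rw [e, PySem.List.pyGetD_natCast, PySem.List.pyGetD_natCast, List.getD_cons_succ]
  have h2 : PySem.List.pyGetD (c :: rest) (((k : Int) + 1) + 1) 0
      = PySem.List.pyGetD rest ((k : Int) + 1) 0 := by
    have e : (((k : Int) + 1) + 1) = ((k + 2 : Nat) : Int) := by push_cast; ring
    have e2 : ((k : Int) + 1) = ((k + 1 : Nat) : Int) := by push_cast; ring
    rw [e, e2, PySem.List.pyGetD_natCast, PySem.List.pyGetD_natCast]
    simp
  have h3 : n + 1 - ((k : Int) + 1) - 1 = n - (k : Int) - 1 := by ring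
  rw [h1, h2, h3]

lemma pvFA_head (c c' : Int) (t : List Int) :
    pvFA (c :: c' :: t) (((c :: c' :: t).length : Int)) 0
      = pvPieceA c c' (((c' :: t).length : Int)) := by
  unfold pvFA pvPieceA pvTerm
  have g0 : PySem.List.pyGetD (c :: c' :: t) (0 : Int) 0 = c := by simp [pysem]
  have g1 : PySem.List.pyGetD (c :: c' :: t) ((0 : Int) + 1) 0 = c' := by
    simpa using PySem.List.pyGetD_natCast (c :: c' :: t) 1 0
  have he : (((c :: c' :: t).length : Int)) - 0 - 1 = ((c' :: t).length : Int) := by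
    simp
  have hne : ((c' :: t).length : Int) ≠ 0 := by
    simp
    omega
  rw [g0, g1, he]
  split_ifs <;> simp_all [String.append_assoc]

lemma mapFA_join : ∀ (coefList : List Int),
    String.join (((List.range (coefList.length - 1)).map
      (fun (k : Nat) => pvFA coefList (coefList.length : Int) (k : Int)))) = pvGA coefList
  | [] => by simp [pvGA, String.join]
  | [c] => by simp [pvGA, String.join]
  | c :: c' :: t => by
      have ih := mapFA_join (c' :: t)
      have hlen : (c :: c' :: t).length - 1 = ((c' :: t).length - 1) + 1 := by simp
      rw [hlen, List.range_succ_eq_map, List.map_cons, join_cons_general, List.map_map]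
      have hshift : (List.range ((c' :: t).length - 1)).map
            ((fun (k : Nat) => pvFA (c :: c' :: t) ((c :: c' :: t).length : Int) (k : Int)) ∘ Nat.succ)
          = (List.range ((c' :: t).length - 1)).map
            (fun (k : Nat) => pvFA (c' :: t) ((c' :: t).length : Int) (k : Int)) := by
        apply List.map_congr_left
        intro k _
        show pvFA (c :: c' :: t) ((c :: c' :: t).length : Int) ((k.succ : Nat) : Int)
            = pvFA (c' :: t) ((c' :: t).length : Int) (k : Int)
        have e1 : ((c :: c' :: t).length : Int) = ((c' :: t).length : Int) + 1 := by simp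
        have e2 : ((k.succ : Nat) : Int) = (k : Int) + 1 := by push_cast; ring
        rw [e1, e2, pvFA_shift]
      rw [hshift, ih]
      simp only [Nat.cast_zero]
      rw [pvFA_head]
      conv_rhs => rw [pvGA]

def pvFin (coefList : List Int) : String :=
  match coefList.getLast? with
  | some x => if x ≠ 0 then PySem.Int.toStr x else ""
  | none => ""

lemma gA_fin_eq_refGo : ∀ (c : Int) (t : List Int),
    pvGA (c :: t) ++ pvFin (c :: t) = refGo true (c :: t)
  | c, [] => by
      by_cases hc : c = 0 <;> simp [pvGA, pvFin, refGo, pvTerm, hc]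
  | c, c' :: t' => by
      have ih := gA_fin_eq_refGo c' t'
      have hfin : pvFin (c :: c' :: t') = pvFin (c' :: t') := by simp [pvFin]
      conv_lhs => rw [pvGA]
      rw [hfin, String.append_assoc, ih]
      unfold pvPieceA
      rw [String.append_assoc, ← refGo_false]
      conv_rhs => rw [refGo]
      by_cases hc : c = 0 <;> simp [hc]

lemma B_fold : ∀ (cs : List Int) (n s : Int) (acc : List String), 0 ≤ s →
    n = s + (cs.length : Int) →
    String.join ((PySem.List.enumerate cs s).foldl
      (fun pieces jc =>
        if jc.2 ≠ 0 then
          pieces ++ [(if 1 ≤ jc.1 then " + " else "") ++ pvTerm jc.2 (n - 1 - jc.1)]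
        else pieces) acc)
      = String.join acc ++ refGo (decide (s = 0)) cs
  | [], n, s, acc, hs, hn => by
      simp [PySem.List.enumerate, refGo]
  | c :: t, n, s, acc, hs, hn => by
      rw [PySem.List.enumerate_cons, List.foldl_cons]
      have hn' : n = (s + 1) + (t.length : Int) := by simp at hn; omega
      by_cases hc : c = 0
      · rw [if_neg (by simp [hc])]
        rw [B_fold t n (s + 1) acc (by omega) hn']
        have h1 : (decide (s + 1 = 0)) = false := by simp; omega
        conv_rhs => rw [refGo]
        rw [h1]
        simp [hc]
      · rw [if_pos (by simp [hc])]
        rw [B_fold t n (s + 1) _ (by omega) hn']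
        have h1 : (decide (s + 1 = 0)) = false := by simp; omega
        have he : n - 1 - s = (t.length : Int) := by omega
        rw [h1, join_append_singleton, he]
        conv_rhs => rw [refGo]
        by_cases hz : s = 0
        · simp [hz, hc, String.append_assoc]
        · have : ¬ (1 : Int) ≤ 0 := by omega
          have hle : (1 : Int) ≤ s := by omega
          simp [hz, hc, hle, String.append_assoc]

lemma B_eq_refGo (coefList : List Int) :
    CoefListToStrPolynom_alt coefList = refGo true coefList ++ " = 0" := by
  simp only [CoefListToStrPolynom_alt]
  rw [B_fold coefList (coefList.length : Int) 0 [] (le_refl 0) (by simp)]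
  simp [String.join]

lemma pyRange_map_FA (cs : List Int) :
    (PySem.List.pyRange 0 ((cs.length : Int) - 1) 1).map (fun i => pvFA cs (cs.length : Int) i)
      = (List.range (cs.length - 1)).map (fun (k : Nat) => pvFA cs (cs.length : Int) (k : Int)) := by
  rw [PySem.List.pyRange_one]
  have h : ((cs.length : Int) - 1 - 0).toNat = cs.length - 1 := by omega
  rw [h, List.map_map]
  apply List.map_congr_left
  intro k _
  simp

def pvABody (coefList : List Int) (n : Int) : String → Int → String :=
  fun polynom i =>
    let ci := PySem.List.pyGetD coefList i 0
    let cn := PySem.List.pyGetD coefList (i + 1) 0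
    if ci = 0 then
      if cn ≠ 0 then polynom ++ " + " else polynom
    else if ci = 1 then
      if cn ≠ 0 then
        if n - i - 1 = 1 then polynom ++ "x + "
        else polynom ++ "x^" ++ PySem.Int.toStr (n - i - 1) ++ " + "
      else
        if n - i - 1 = 1 then polynom ++ "x"
        else polynom ++ "x^" ++ PySem.Int.toStr (n - i - 1)
    else
      if cn ≠ 0 then
        if n - i - 1 = 1 then polynom ++ PySem.Int.toStr ci ++ "*x + "
        else polynom ++ PySem.Int.toStr ci ++ "*x^" ++ PySem.Int.toStr (n - i - 1) ++ " + "
      else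
        if n - i - 1 = 1 then polynom ++ PySem.Int.toStr ci ++ "*x"
        else polynom ++ PySem.Int.toStr ci ++ "*x^" ++ PySem.Int.toStr (n - i - 1)

lemma A_unfold (coefList : List Int) :
    CoefListToStrPolynom coefList =
      (if PySem.List.pyGetD coefList (-1) 0 ≠ 0 then
        (PySem.List.pyRange 0 ((coefList.length : Int) - 1) 1).foldl
            (pvABody coefList (coefList.length : Int)) ""
          ++ (PySem.Int.toStr (PySem.List.pyGetD coefList (-1) 0) ++ " = 0")
      else
        (PySem.List.pyRange 0 ((coefList.length : Int) - 1) 1).foldl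
            (pvABody coefList (coefList.length : Int)) "" ++ " = 0") := rfl

lemma A_eq_refGo (c : Int) (t : List Int) :
    CoefListToStrPolynom (c :: t) = refGo true (c :: t) ++ " = 0" := by
  have hbody : pvABody (c :: t) ((c :: t).length : Int)
      = fun acc i => acc ++ pvFA (c :: t) ((c :: t).length : Int) i :=
    funext fun acc => funext fun i => A_fold_body (c :: t) ((c :: t).length : Int) acc i
  have hne : (c :: t) ≠ ([] : List Int) := by simp
  have hlast : PySem.List.pyGetD (c :: t) (-1) 0 = (c :: t).getLast hne :=
    PySem.List.pyGetD_neg_one (c :: t) 0 hne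
  have hfin : pvFin (c :: t)
      = if (c :: t).getLast hne ≠ 0 then PySem.Int.toStr ((c :: t).getLast hne) else "" := by
    simp [pvFin, List.getLast?_eq_some_getLast]
  have hmain := gA_fin_eq_refGo c t
  rw [A_unfold, hbody, foldl_strAppend, pyRange_map_FA, mapFA_join, hlast]
  rw [← hmain, hfin]
  by_cases h0 : (c :: t).getLast hne = 0
  · simp [h0]
  · simp [h0, String.append_assoc]

-- ===== VERDICT (by name: the statement is the Claim_ definition above) =====
theorem CoefListToStrPolynom_spec : Claim_equal_CoefListToStrPolynom := by
  intro coefList _ hpre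
  unfold Spec_CoefListToStrPolynom
  cases coefList with
  | nil => exact absurd rfl hpre
  | cons c t => rw [A_eq_refGo, B_eq_refGo]
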